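-- pv_equiv track=rewrite | github.com/alexandergrote/cts | src/preprocess/extraction/tmp.py | prefixspan_iterative
-- ===== SOURCE A (Python) =====
-- from collections import defaultdict
--
-- def prefixspan_iterative(database, min_support, max_length, classes):
--
--     assert len(database) == len(classes)
--
--     # prepare data for while loop
--     # more memory efficient than recursion - prevents stack overflow
--     stack = [([], database, classes)]
--     patterns = []
--
--     while stack:
--
--         prefix, projected_db, projected_classes = stack.pop()
--
--         freq_items = defaultdict(int)
--         freq_items_pos = defaultdict(int)
--         freq_items_neg = defaultdict(int)
--
--         assert len(projected_db) == len(projected_classes)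
--
--         for sequence, class_value in zip(projected_db, projected_classes):
--
--             used = set()
--             for item in sequence:
--                 if item in used:
--                     continue
--
--                 freq_items[item] += 1
--
--                 if class_value == 0:
--                     freq_items_neg[item] += 1
--
--                 if class_value == 1:
--                     freq_items_pos[item] += 1
--
--                 used.add(item)
--
--         for item, count in freq_items.items():
--
--             if count < min_support:
--                 continue
--
--             if len(prefix) + 1 > max_length:
--                 continue
--
--             new_prefix = prefix + [item]
--
--             patterns.append((new_prefix, count, freq_items_neg.get(item, 0), freq_items_pos.get(item, 0)))
--
--             new_projected_db = []
--             new_classes = []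
--
--             for sequence, class_value in zip(projected_db, projected_classes):
--
--                 try:
--
--                     index = sequence.index(item)
--                     new_projected_db.append(sequence[index + 1:])
--                     new_classes.append(class_value)
--
--                 except ValueError:
--                     continue
--
--             stack.append((new_prefix, new_projected_db, new_classes))
--
--     return patterns
-- ===== SOURCE B (Python) =====
-- def _project(entries, item):
--     out = []
--     for seq, start, cv in entries:
--         try:
--             pos = seq.index(item, start)
--         except ValueError:
--             continue
--         out.append((seq, pos + 1, cv))
--     return out
--
--
-- def _mine(prefix, entries, min_support, max_length):
--     stats = {}
--     for seq, start, cv in entries: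
--         for item in dict.fromkeys(seq[start:]):
--             c, n, p = stats.get(item, (0, 0, 0))
--             stats[item] = (c + 1, n + (1 if cv == 0 else 0), p + (1 if cv == 1 else 0))
--     if len(prefix) + 1 > max_length:
--         qual = []
--     else:
--         qual = [kv for kv in stats.items() if kv[1][0] >= min_support]
--     here = [(prefix + [it], c, n, p) for it, (c, n, p) in qual]
--     children = [_mine(prefix + [it], _project(entries, it), min_support, max_length)
--                 for it, _ in qual]
--     for ch in reversed(children):
--         here.extend(ch)
--     return here
--
--
-- def prefixspan_iterative(database, min_support, max_length, classes):
--     assert len(database) == len(classes)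
--     entries = [(seq, 0, cv) for seq, cv in zip(database, classes)]
--     return _mine([], entries, min_support, max_length)
-- ===== Notes on version B (the rewrite author's own statement) =====
-- stated objective: alternative
-- what changed: B replaces A's explicit while-stack with recursive depth-first mining: each call counts distinct items of its (sequence,start,class) pointer entries into one dict of (count,neg,pos) triples via dict.fromkeys, builds the local patterns and the recursively mined child results in staged comprehensions, and splices the children after the local patterns in reversed order to reproduce the LIFO output order; no suffix copies and no shared patterns/stack state.
import Mathlib
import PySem

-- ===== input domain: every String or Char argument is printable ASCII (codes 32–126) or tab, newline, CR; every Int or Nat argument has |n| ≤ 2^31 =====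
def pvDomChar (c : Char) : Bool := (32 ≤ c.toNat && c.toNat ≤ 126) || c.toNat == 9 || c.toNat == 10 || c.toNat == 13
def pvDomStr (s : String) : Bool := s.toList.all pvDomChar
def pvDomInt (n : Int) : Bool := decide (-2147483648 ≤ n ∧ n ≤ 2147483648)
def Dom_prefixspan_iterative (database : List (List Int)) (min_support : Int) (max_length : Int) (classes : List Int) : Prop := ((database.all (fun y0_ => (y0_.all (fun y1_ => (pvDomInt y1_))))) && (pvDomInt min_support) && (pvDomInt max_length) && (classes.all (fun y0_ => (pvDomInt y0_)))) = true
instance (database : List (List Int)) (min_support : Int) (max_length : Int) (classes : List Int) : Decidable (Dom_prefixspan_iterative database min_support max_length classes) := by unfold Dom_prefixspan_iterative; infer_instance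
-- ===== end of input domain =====

-- B replaces A's explicit while-stack by recursive depth-first mining over (sequence, start,
-- class) pointer entries: each call counts distinct items via dict.fromkeys into ONE dict of
-- (count, neg, pos) triples, builds local patterns and child results in staged comprehensions,
-- and splices the reversed child results after the local patterns (reproducing LIFO order).

-- ===== PORT A =====
-- A's inner `for item in sequence` body: three defaultdicts plus the `used` set.
def pvCountStepA (cv : Int)
    (st : PySem.Dict Int Int × PySem.Dict Int Int × PySem.Dict Int Int × PySem.Set Int)
    (item : Int) :
    PySem.Dict Int Int × PySem.Dict Int Int × PySem.Dict Int Int × PySem.Set Int :=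
  if PySem.Set.contains st.2.2.2 item then st
  else
    (PySem.Dict.modify st.1 item 0 (· + 1),
     if cv == 0 then PySem.Dict.modify st.2.1 item 0 (· + 1) else st.2.1,
     if cv == 1 then PySem.Dict.modify st.2.2.1 item 0 (· + 1) else st.2.2.1,
     PySem.Set.add st.2.2.2 item)

-- A's `for sequence, class_value in zip(...)` counting loop.
def pvCountA (db : List (List Int)) (cls : List Int) :
    PySem.Dict Int Int × PySem.Dict Int Int × PySem.Dict Int Int :=
  (db.zip cls).foldl
    (fun d sc =>
      let r := sc.1.foldl (pvCountStepA sc.2) (d.1, d.2.1, d.2.2, PySem.Set.empty)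
      (r.1, r.2.1, r.2.2.1))
    (PySem.Dict.empty, PySem.Dict.empty, PySem.Dict.empty)

-- A's re-projection loop: sequence.index raising ValueError = index? returning none.
def pvProjectA (db : List (List Int)) (cls : List Int) (item : Int) :
    List (List Int) × List Int :=
  (db.zip cls).foldl
    (fun acc sc =>
      match PySem.List.index? sc.1 item with
      | some idx => (acc.1 ++ [PySem.List.slice sc.1 (some ((idx : Int) + 1)) none], acc.2 ++ [sc.2])
      | none => acc)
    ([], [])

-- A's `for item, count in freq_items.items()` loop over (patterns, stack).
def pvItemsA (min_support max_length : Int) (pfx : List Int)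
    (db : List (List Int)) (cls : List Int)
    (acc : List (List Int × Int × Int × Int) × List (List Int × List (List Int) × List Int)) :
    List (List Int × Int × Int × Int) × List (List Int × List (List Int) × List Int) :=
  let c := pvCountA db cls
  (PySem.Dict.items c.1).foldl
    (fun acc kv =>
      if kv.2 < min_support then acc
      else if (pfx.length : Int) + 1 > max_length then acc
      else
        let np := pfx ++ [kv.1]
        let pr := pvProjectA db cls kv.1
        (acc.1 ++ [(np, kv.2, PySem.Dict.getD c.2.1 kv.1 0, PySem.Dict.getD c.2.2 kv.1 0)],
         (np, pr.1, pr.2) :: acc.2))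
    acc

-- termination measure for A's while-stack loop
def pvMsum (db : List (List Int)) : Nat := (db.map (fun s => s.length + 1)).sum
def pvWt (db : List (List Int)) : Nat := Nat.factorial (pvMsum db + 1)
def pvMeas (stack : List (List Int × List (List Int) × List Int)) : Nat :=
  (stack.map (fun nd => pvWt nd.2.1)).sum

-- ---- termination lemmas (cited by pvLoopA's decreasing_by) ----

lemma pvKeysStepA (cv : Int) (t : List Int)
    (st : PySem.Dict Int Int × PySem.Dict Int Int × PySem.Dict Int Int × PySem.Set Int)
    (h : st.1.keys.Nodup) :
    (t.foldl (pvCountStepA cv) st).1.keys.Nodup ∧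
      ∀ k ∈ (t.foldl (pvCountStepA cv) st).1.keys, k ∈ st.1.keys ∨ k ∈ t := by
  induction t generalizing st with
  | nil => exact ⟨h, fun k hk => Or.inl hk⟩
  | cons x r ih =>
    have hstep : (pvCountStepA cv st x).1.keys.Nodup ∧
        ∀ k ∈ (pvCountStepA cv st x).1.keys, k ∈ st.1.keys ∨ k = x := by
      unfold pvCountStepA
      by_cases hu : PySem.Set.contains st.2.2.2 x = true
      · simp only [hu, if_true]
        exact ⟨h, fun k hk => Or.inl hk⟩
      · simp only [Bool.not_eq_true] at hu
        simp only [hu, Bool.false_eq_true, if_false]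
        rw [PySem.Dict.keys_modify]
        by_cases hc : PySem.Dict.contains st.1 x = true
        · rw [PySem.Dict.keys_insert_of_contains _ _ hc]
          exact ⟨h, fun k hk => Or.inl hk⟩
        · simp only [Bool.not_eq_true] at hc
          rw [PySem.Dict.keys_insert_of_not_contains _ _ hc]
          constructor
          · rw [List.nodup_append]
            refine ⟨h, List.nodup_singleton x, ?_⟩
            intro a ha b hb
            rw [List.mem_singleton] at hb
            subst hb
            intro hax
            subst hax
            have := (PySem.Dict.contains_iff_mem_keys st.1 a).mpr ha
            rw [hc] at this
            exact Bool.false_ne_true this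
          · intro k hk
            rcases List.mem_append.mp hk with hk | hk
            · exact Or.inl hk
            · exact Or.inr (List.mem_singleton.mp hk)
    simp only [List.foldl_cons]
    rcases ih (pvCountStepA cv st x) hstep.1 with ⟨hn, hm⟩
    refine ⟨hn, fun k hk => ?_⟩
    rcases hm k hk with hk' | hk'
    · rcases hstep.2 k hk' with hk'' | hk''
      · exact Or.inl hk''
      · exact Or.inr (by simp [hk''])
    · exact Or.inr (List.mem_cons_of_mem _ hk')

lemma pvKeysCountA (db : List (List Int)) (cls : List Int) :
    (pvCountA db cls).1.keys.Nodup ∧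
      ∀ k ∈ (pvCountA db cls).1.keys, k ∈ ((db.zip cls).map (·.1)).flatten := by
  unfold pvCountA
  have main : ∀ (zs : List (List Int × Int))
      (d : PySem.Dict Int Int × PySem.Dict Int Int × PySem.Dict Int Int), d.1.keys.Nodup →
      ((zs.foldl (fun d sc =>
          let r := sc.1.foldl (pvCountStepA sc.2) (d.1, d.2.1, d.2.2, PySem.Set.empty)
          (r.1, r.2.1, r.2.2.1)) d).1.keys.Nodup ∧
        ∀ k ∈ (zs.foldl (fun d sc =>
          let r := sc.1.foldl (pvCountStepA sc.2) (d.1, d.2.1, d.2.2, PySem.Set.empty)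
          (r.1, r.2.1, r.2.2.1)) d).1.keys, k ∈ d.1.keys ∨ k ∈ (zs.map (·.1)).flatten) := by
    intro zs
    induction zs with
    | nil => exact fun d h => ⟨h, fun k hk => Or.inl hk⟩
    | cons sc r ih =>
      intro d h
      simp only [List.foldl_cons]
      have hstep := pvKeysStepA sc.2 sc.1 (d.1, d.2.1, d.2.2, PySem.Set.empty) h
      rcases ih ((List.foldl (pvCountStepA sc.2) (d.1, d.2.1, d.2.2, PySem.Set.empty) sc.1).1,
        (List.foldl (pvCountStepA sc.2) (d.1, d.2.1, d.2.2, PySem.Set.empty) sc.1).2.1,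
        (List.foldl (pvCountStepA sc.2) (d.1, d.2.1, d.2.2, PySem.Set.empty) sc.1).2.2.1) hstep.1 with ⟨hn, hm⟩
      refine ⟨hn, fun k hk => ?_⟩
      rcases hm k hk with hk' | hk'
      · rcases hstep.2 k hk' with hk'' | hk''
        · exact Or.inl hk''
        · exact Or.inr (by simp only [List.map_cons, List.flatten_cons, List.mem_append]; exact Or.inl hk'')
      · exact Or.inr (by simp only [List.map_cons, List.flatten_cons, List.mem_append]; exact Or.inr hk')
  have h0 := main (db.zip cls) (PySem.Dict.empty, PySem.Dict.empty, PySem.Dict.empty)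
    (by simpa using PySem.Dict.nodup_keys_empty)
  refine ⟨h0.1, fun k hk => ?_⟩
  rcases h0.2 k hk with hk' | hk'
  · rw [PySem.Dict.keys_empty] at hk'
    exact absurd hk' (List.not_mem_nil)
  · exact hk'

lemma pvProjA_msum (db : List (List Int)) (cls : List Int) (item : Int) :
    pvMsum (pvProjectA db cls item).1 ≤ (((db.zip cls).map (·.1)).flatten).length := by
  unfold pvProjectA
  have main : ∀ (zs : List (List Int × Int)) (acc : List (List Int) × List Int),
      pvMsum ((zs.foldl (fun acc sc =>
        match PySem.List.index? sc.1 item with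
        | some idx => (acc.1 ++ [PySem.List.slice sc.1 (some ((idx : Int) + 1)) none], acc.2 ++ [sc.2])
        | none => acc) acc).1) ≤ pvMsum acc.1 + ((zs.map (·.1)).flatten).length := by
    intro zs
    induction zs with
    | nil => intro acc; simp
    | cons sc r ih =>
      intro acc
      simp only [List.foldl_cons, List.map_cons, List.flatten_cons, List.length_append]
      cases h : PySem.List.index? sc.1 item with
      | none =>
        simp only [h]
        have hih := ih acc
        omega
      | some idx =>
        simp only [h]
        obtain ⟨hk, -, -⟩ := PySem.List.getElem_of_index?_eq_some h
        have hcast : ((idx : Int) + 1) = ((idx + 1 : Nat) : Int) := by push_cast; ring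
        have hlen : (PySem.List.slice sc.1 (some ((idx : Int) + 1)) none).length + 1 ≤ sc.1.length := by
          rw [hcast, PySem.List.slice_from_natCast, List.length_drop]
          omega
        have hih := ih (acc.1 ++ [PySem.List.slice sc.1 (some ((idx : Int) + 1)) none], acc.2 ++ [sc.2])
        simp only [] at hih
        have hmsum : pvMsum (acc.1 ++ [PySem.List.slice sc.1 (some ((idx : Int) + 1)) none])
            = pvMsum acc.1 + ((PySem.List.slice sc.1 (some ((idx : Int) + 1)) none).length + 1) := by
          simp [pvMsum]
        omega
  have h0 := main (db.zip cls) ([], [])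
  simp only [pvMsum, List.map_nil, List.sum_nil, Nat.zero_add] at h0
  exact h0

lemma pvLa_le (db : List (List Int)) (cls : List Int) :
    ((((db.zip cls)).map (·.1)).flatten).length ≤ db.flatten.length := by
  induction db generalizing cls with
  | nil => simp
  | cons s rest ih =>
    cases cls with
    | nil => simp
    | cons c cr =>
      simp only [List.zip_cons_cons, List.map_cons, List.flatten_cons, List.length_append]
      exact Nat.add_le_add_left (ih cr) _

lemma pvMsum_eq (db : List (List Int)) : pvMsum db = db.flatten.length + db.length := by
  induction db with
  | nil => simp [pvMsum]
  | cons s rest ih => simp [pvMsum, List.flatten_cons] at *; omega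

lemma pvSumWt_lt (db : List (List Int)) (cls : List Int) (Q : List Int) (f : Int → List (List Int))
    (hQn : Q.Nodup)
    (hQs : ∀ q ∈ Q, q ∈ ((db.zip cls).map (·.1)).flatten)
    (hf : ∀ q ∈ Q, pvMsum (f q) ≤ (((db.zip cls).map (·.1)).flatten).length) :
    (Q.map (fun q => pvWt (f q))).sum < pvWt db := by
  rcases Q with _ | ⟨q, Q'⟩
  · simpa [pvWt] using Nat.factorial_pos (pvMsum db + 1)
  · have hqLa : q ∈ (((db.zip cls)).map (·.1)).flatten := hQs q (by simp)
    have hdb1 : 1 ≤ db.length := by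
      cases db with
      | nil => simp at hqLa
      | cons _ _ => simp
    have hn : ((((db.zip cls)).map (·.1)).flatten).length ≤ db.flatten.length := pvLa_le db cls
    have hcard : (q :: Q').length ≤ ((((db.zip cls)).map (·.1)).flatten).length := by
      calc (q :: Q').length = (q :: Q').toFinset.card := (List.toFinset_card_of_nodup hQn).symm
      _ ≤ ((((db.zip cls)).map (·.1)).flatten).toFinset.card := by
          apply Finset.card_le_card
          intro x hx
          rw [List.mem_toFinset] at hx ⊢
          exact hQs x hx
      _ ≤ ((((db.zip cls)).map (·.1)).flatten).length := List.toFinset_card_le _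
    set n := ((((db.zip cls)).map (·.1)).flatten).length with hnd
    have hmem : ∀ x ∈ ((q :: Q').map (fun q => pvWt (f q))), x ≤ Nat.factorial (n + 1) := by
      intro x hx
      rcases List.mem_map.mp hx with ⟨a, ha, rfl⟩
      exact Nat.factorial_le (Nat.add_le_add_right (hf a ha) 1)
    have hsum := List.sum_le_card_nsmul _ _ hmem
    rw [List.length_map, smul_eq_mul] at hsum
    have hsum2 : ((q :: Q').map (fun q => pvWt (f q))).sum ≤ n * Nat.factorial (n + 1) :=
      le_trans hsum (Nat.mul_le_mul_right _ hcard)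
    have hlt : n * Nat.factorial (n + 1) < Nat.factorial (n + 1 + 1) := by
      rw [Nat.factorial_succ]
      exact Nat.mul_lt_mul_of_lt_of_le (by omega) le_rfl (Nat.factorial_pos _)
    have hle : Nat.factorial (n + 1 + 1) ≤ pvWt db := by
      unfold pvWt
      apply Nat.factorial_le
      rw [pvMsum_eq]
      omega
    omega

lemma pvItemsA_shape (ms ml : Int) (pfx : List Int) (db : List (List Int)) (cls : List Int)
    (pats : List (List Int × Int × Int × Int))
    (rest : List (List Int × List (List Int) × List Int)) :
    pvItemsA ms ml pfx db cls (pats, rest)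
      = (pats ++ (((PySem.Dict.items (pvCountA db cls).1).filter
            (fun kv => !decide (kv.2 < ms) && !decide ((pfx.length : Int) + 1 > ml))).map
            (fun kv => (pfx ++ [kv.1], kv.2, PySem.Dict.getD (pvCountA db cls).2.1 kv.1 0,
                        PySem.Dict.getD (pvCountA db cls).2.2 kv.1 0))),
         (((PySem.Dict.items (pvCountA db cls).1).filter
            (fun kv => !decide (kv.2 < ms) && !decide ((pfx.length : Int) + 1 > ml))).map
            (fun kv => (pfx ++ [kv.1], (pvProjectA db cls kv.1).1, (pvProjectA db cls kv.1).2))).reverse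
           ++ rest) := by
  show (PySem.Dict.items (pvCountA db cls).1).foldl _ (pats, rest) = _
  generalize PySem.Dict.items (pvCountA db cls).1 = L
  induction L generalizing pats rest with
  | nil => simp
  | cons kv r ih =>
    simp only [List.foldl_cons, List.filter_cons]
    by_cases h1 : kv.2 < ms
    · rw [if_pos h1]
      have hg : (!decide (kv.2 < ms) && !decide ((pfx.length : Int) + 1 > ml)) = false := by
        simp [h1]
      rw [hg]
      simp only [Bool.false_eq_true, if_false]
      exact ih pats rest
    · by_cases h2 : (pfx.length : Int) + 1 > ml
      · rw [if_neg h1, if_pos h2]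
        have hg : (!decide (kv.2 < ms) && !decide ((pfx.length : Int) + 1 > ml)) = false := by
          simp [h2]
        rw [hg]
        simp only [Bool.false_eq_true, if_false]
        exact ih pats rest
      · rw [if_neg h1, if_neg h2]
        have hg : (!decide (kv.2 < ms) && !decide ((pfx.length : Int) + 1 > ml)) = true := by
          simp [h1, h2]
        rw [hg]
        simp only [if_true]
        rw [ih]
        simp [List.append_assoc]

lemma pvMeasItemsA (ms ml : Int) (pfx : List Int) (db : List (List Int)) (cls : List Int)
    (pats : List (List Int × Int × Int × Int))
    (rest : List (List Int × List (List Int) × List Int)) :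
    pvMeas (pvItemsA ms ml pfx db cls (pats, rest)).2 < pvWt db + pvMeas rest := by
  rw [pvItemsA_shape]
  have hkeys := pvKeysCountA db cls
  have hsub : ((((PySem.Dict.items (pvCountA db cls).1).filter
        (fun kv => !decide (kv.2 < ms) && !decide ((pfx.length : Int) + 1 > ml))).map (·.1))).Sublist
      ((PySem.Dict.items (pvCountA db cls).1).map (·.1)) :=
    (List.filter_sublist).map _
  have hkeq : (PySem.Dict.items (pvCountA db cls).1).map (·.1) = (pvCountA db cls).1.keys := rfl
  rw [hkeq] at hsub
  have hlt := pvSumWt_lt db cls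
    (((PySem.Dict.items (pvCountA db cls).1).filter
        (fun kv => !decide (kv.2 < ms) && !decide ((pfx.length : Int) + 1 > ml))).map (·.1))
    (fun q => (pvProjectA db cls q).1)
    (hkeys.1.sublist hsub)
    (fun q hq => hkeys.2 q (hsub.mem hq))
    (fun q _ => pvProjA_msum db cls q)
  simp only [pvMeas, List.map_append, List.map_reverse, List.sum_append, List.sum_reverse,
    List.map_map] at *
  have hcomp : (((PySem.Dict.items (pvCountA db cls).1).filter
        (fun kv => !decide (kv.2 < ms) && !decide ((pfx.length : Int) + 1 > ml))).map
        ((fun nd => pvWt nd.2.1) ∘ (fun kv => (pfx ++ [kv.1], (pvProjectA db cls kv.1).1, (pvProjectA db cls kv.1).2))))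
      = (((PySem.Dict.items (pvCountA db cls).1).filter
        (fun kv => !decide (kv.2 < ms) && !decide ((pfx.length : Int) + 1 > ml))).map
        ((fun q => pvWt (pvProjectA db cls q).1) ∘ (·.1))) := rfl
  rw [hcomp] at *
  omega

-- A's while-stack loop (head of the list = top of the stack; push = cons).
def pvLoopA (ms ml : Int) :
    List (List Int × List (List Int) × List Int) →
    List (List Int × Int × Int × Int) → List (List Int × Int × Int × Int)
  | [], patterns => patterns
  | nd :: rest, patterns =>
      let r := pvItemsA ms ml nd.1 nd.2.1 nd.2.2 (patterns, rest)
      pvLoopA ms ml r.2 r.1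
termination_by stack _ => pvMeas stack
decreasing_by
  calc pvMeas r.2 < pvWt nd.2.1 + pvMeas rest := pvMeasItemsA ms ml nd.1 nd.2.1 nd.2.2 patterns rest
  _ = pvMeas (nd :: rest) := by simp [pvMeas]

def prefixspan_iterative (database : List (List Int)) (min_support : Int) (max_length : Int) (classes : List Int) : List (List Int × Int × Int × Int) :=
  pvLoopA min_support max_length [([], database, classes)] []

-- ===== PORT B =====
-- B's projected entries: (sequence, start, class) pointers into the original sequences.

-- Python's seq.index(item, start): first index ≥ start, = start + index in the suffix
-- (ValueError = none); exact since B only ever has start ≤ len(seq).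
def pvIndexFrom (s : List Int) (start : Nat) (item : Int) : Option Nat :=
  (PySem.List.index? (s.drop start) item).map (start + ·)

-- B's _project loop (append to out ⇒ structural recursion in order).
def pvProject (entries : List (List Int × Nat × Int)) (item : Int) :
    List (List Int × Nat × Int) :=
  match entries with
  | [] => []
  | e :: r =>
      match pvIndexFrom e.1 e.2.1 item with
      | some p => (e.1, p + 1, e.2.2) :: pvProject r item
      | none => pvProject r item

-- B's stats loop: dict.fromkeys(seq[start:]) = PySem.List.dedup, one dict of triples.
def pvCountB (entries : List (List Int × Nat × Int)) : PySem.Dict Int (Int × Int × Int) :=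
  entries.foldl
    (fun d e =>
      (PySem.List.dedup (e.1.drop e.2.1)).foldl
        (fun d item =>
          let t := PySem.Dict.getD d item (0, 0, 0)
          PySem.Dict.insert d item
            (t.1 + 1, t.2.1 + (if e.2.2 == 0 then 1 else 0), t.2.2 + (if e.2.2 == 1 then 1 else 0)))
        d)
    PySem.Dict.empty

-- B's qual list: [] if the length guard fails, else the supported items.
def pvQual (ms ml : Int) (pfx : List Int) (entries : List (List Int × Nat × Int)) :
    List (Int × Int × Int × Int) :=
  if (pfx.length : Int) + 1 > ml then []
  else (PySem.Dict.items (pvCountB entries)).filter (fun kv => decide (kv.2.1 ≥ ms))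

-- termination measure for B's recursion: total length of the pointed-to suffixes
def pvMEnt (entries : List (List Int × Nat × Int)) : Nat :=
  (entries.map (fun e => (e.1.drop e.2.1).length)).sum

-- ---- termination lemmas (cited by pvMine's decreasing_by) ----

lemma pvProject_mEnt_le (entries : List (List Int × Nat × Int)) (item : Int) :
    pvMEnt (pvProject entries item) ≤ pvMEnt entries := by
  induction entries with
  | nil => simp [pvProject, pvMEnt]
  | cons e r ih =>
    rw [pvProject]
    cases h : pvIndexFrom e.1 e.2.1 item with
    | none =>
      simp only [h]
      have : pvMEnt (e :: r) = (e.1.drop e.2.1).length + pvMEnt r := by simp [pvMEnt]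
      omega
    | some p =>
      simp only [h]
      rcases Option.map_eq_some_iff.mp h with ⟨idx, hidx, hp⟩
      obtain ⟨hk, -, -⟩ := PySem.List.getElem_of_index?_eq_some hidx
      rw [List.length_drop] at hk
      have h1 : pvMEnt ((e.1, p + 1, e.2.2) :: pvProject r item)
          = (e.1.drop (p + 1)).length + pvMEnt (pvProject r item) := by simp [pvMEnt]
      have h2 : pvMEnt (e :: r) = (e.1.drop e.2.1).length + pvMEnt r := by simp [pvMEnt]
      have h3 : (e.1.drop (p + 1)).length < (e.1.drop e.2.1).length := by
        rw [List.length_drop, List.length_drop]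
        omega
      omega

lemma pvProject_mEnt_lt (entries : List (List Int × Nat × Int)) (item : Int)
    (hmem : item ∈ (entries.map (fun e => e.1.drop e.2.1)).flatten) :
    pvMEnt (pvProject entries item) < pvMEnt entries := by
  induction entries with
  | nil => simp at hmem
  | cons e r ih =>
    simp only [List.map_cons, List.flatten_cons, List.mem_append] at hmem
    rw [pvProject]
    cases h : pvIndexFrom e.1 e.2.1 item with
    | none =>
      simp only [h]
      have hnm : item ∉ e.1.drop e.2.1 := by
        unfold pvIndexFrom at h
        rw [Option.map_eq_none_iff, PySem.List.index?_eq_none_iff] at h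
        exact h
      have hm : item ∈ (r.map (fun e => e.1.drop e.2.1)).flatten := by
        rcases hmem with hmem | hmem
        · exact absurd hmem hnm
        · exact hmem
      have : pvMEnt (e :: r) = (e.1.drop e.2.1).length + pvMEnt r := by simp [pvMEnt]
      have := ih hm
      omega
    | some p =>
      simp only [h]
      rcases Option.map_eq_some_iff.mp h with ⟨idx, hidx, hp⟩
      obtain ⟨hk, -, -⟩ := PySem.List.getElem_of_index?_eq_some hidx
      rw [List.length_drop] at hk
      have h1 : pvMEnt ((e.1, p + 1, e.2.2) :: pvProject r item)
          = (e.1.drop (p + 1)).length + pvMEnt (pvProject r item) := by simp [pvMEnt]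
      have h2 : pvMEnt (e :: r) = (e.1.drop e.2.1).length + pvMEnt r := by simp [pvMEnt]
      have h3 : (e.1.drop (p + 1)).length < (e.1.drop e.2.1).length := by
        rw [List.length_drop, List.length_drop]
        omega
      have := pvProject_mEnt_le r item
      omega

lemma pvKeysCountB (entries : List (List Int × Nat × Int)) :
    (pvCountB entries).keys.Nodup ∧
      ∀ k ∈ (pvCountB entries).keys, k ∈ (entries.map (fun e => e.1.drop e.2.1)).flatten := by
  have inner : ∀ (cv : Int) (u : List Int) (d : PySem.Dict Int (Int × Int × Int)), d.keys.Nodup →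
      ((u.foldl (fun d item =>
          let t := PySem.Dict.getD d item (0, 0, 0)
          PySem.Dict.insert d item
            (t.1 + 1, t.2.1 + (if cv == 0 then 1 else 0), t.2.2 + (if cv == 1 then 1 else 0))) d).keys.Nodup ∧
        ∀ k ∈ (u.foldl (fun d item =>
          let t := PySem.Dict.getD d item (0, 0, 0)
          PySem.Dict.insert d item
            (t.1 + 1, t.2.1 + (if cv == 0 then 1 else 0), t.2.2 + (if cv == 1 then 1 else 0))) d).keys,
          k ∈ d.keys ∨ k ∈ u) := by
    intro cv u
    induction u with
    | nil => exact fun d h => ⟨h, fun k hk => Or.inl hk⟩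
    | cons x r ih =>
      intro d h
      have hstep : ∀ (v : Int × Int × Int), (PySem.Dict.insert d x v).keys.Nodup ∧
          ∀ k ∈ (PySem.Dict.insert d x v).keys, k ∈ d.keys ∨ k = x := by
        intro v
        by_cases hc : PySem.Dict.contains d x = true
        · rw [PySem.Dict.keys_insert_of_contains _ _ hc]
          exact ⟨h, fun k hk => Or.inl hk⟩
        · simp only [Bool.not_eq_true] at hc
          rw [PySem.Dict.keys_insert_of_not_contains _ _ hc]
          constructor
          · rw [List.nodup_append]
            refine ⟨h, List.nodup_singleton x, ?_⟩
            intro a ha b hb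
            rw [List.mem_singleton] at hb
            subst hb
            intro hax
            subst hax
            have := (PySem.Dict.contains_iff_mem_keys d a).mpr ha
            rw [hc] at this
            exact Bool.false_ne_true this
          · intro k hk
            rcases List.mem_append.mp hk with hk | hk
            · exact Or.inl hk
            · exact Or.inr (List.mem_singleton.mp hk)
      simp only [List.foldl_cons]
      rcases ih _ (hstep _).1 with ⟨hn, hm⟩
      refine ⟨hn, fun k hk => ?_⟩
      rcases hm k hk with hk' | hk'
      · rcases (hstep _).2 k hk' with hk'' | hk''
        · exact Or.inl hk''
        · exact Or.inr (by simp [hk''])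
      · exact Or.inr (List.mem_cons_of_mem _ hk')
  unfold pvCountB
  have main : ∀ (es : List (List Int × Nat × Int)) (d : PySem.Dict Int (Int × Int × Int)),
      d.keys.Nodup →
      ((es.foldl (fun d e =>
          (PySem.List.dedup (e.1.drop e.2.1)).foldl
            (fun d item =>
              let t := PySem.Dict.getD d item (0, 0, 0)
              PySem.Dict.insert d item
                (t.1 + 1, t.2.1 + (if e.2.2 == 0 then 1 else 0), t.2.2 + (if e.2.2 == 1 then 1 else 0)))
            d) d).keys.Nodup ∧
        ∀ k ∈ (es.foldl (fun d e =>
          (PySem.List.dedup (e.1.drop e.2.1)).foldl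
            (fun d item =>
              let t := PySem.Dict.getD d item (0, 0, 0)
              PySem.Dict.insert d item
                (t.1 + 1, t.2.1 + (if e.2.2 == 0 then 1 else 0), t.2.2 + (if e.2.2 == 1 then 1 else 0)))
            d) d).keys,
          k ∈ d.keys ∨ k ∈ (es.map (fun e => e.1.drop e.2.1)).flatten) := by
    intro es
    induction es with
    | nil => exact fun d h => ⟨h, fun k hk => Or.inl hk⟩
    | cons e r ih =>
      intro d h
      simp only [List.foldl_cons]
      have hstep := inner e.2.2 (PySem.List.dedup (e.1.drop e.2.1)) d h
      rcases ih _ hstep.1 with ⟨hn, hm⟩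
      refine ⟨hn, fun k hk => ?_⟩
      rcases hm k hk with hk' | hk'
      · rcases hstep.2 k hk' with hk'' | hk''
        · exact Or.inl hk''
        · refine Or.inr ?_
          simp only [List.map_cons, List.flatten_cons, List.mem_append]
          rw [PySem.List.dedup_eq_ofList, PySem.Set.mem_ofList] at hk''
          exact Or.inl hk''
      · exact Or.inr (by simp only [List.map_cons, List.flatten_cons, List.mem_append]; exact Or.inr hk')
  have h0 := main entries PySem.Dict.empty (by simpa using PySem.Dict.nodup_keys_empty)
  refine ⟨h0.1, fun k hk => ?_⟩
  rcases h0.2 k hk with hk' | hk'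
  · rw [PySem.Dict.keys_empty] at hk'
    exact absurd hk' (List.not_mem_nil)
  · exact hk'

lemma pvQualDec (ms ml : Int) (pfx : List Int) (entries : List (List Int × Nat × Int))
    (kv : Int × Int × Int × Int) (h : kv ∈ pvQual ms ml pfx entries) :
    pvMEnt (pvProject entries kv.1) < pvMEnt entries := by
  unfold pvQual at h
  split_ifs at h with hml
  · exact absurd h (List.not_mem_nil)
  · have hitems : kv ∈ PySem.Dict.items (pvCountB entries) := List.mem_of_mem_filter h
    have hkey : kv.1 ∈ (pvCountB entries).keys := by
      have : kv.1 ∈ (PySem.Dict.items (pvCountB entries)).map (·.1) :=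
        List.mem_map_of_mem hitems
      exact this
    exact pvProject_mEnt_lt entries kv.1 ((pvKeysCountB entries).2 kv.1 hkey)

-- B's recursive _mine: local patterns, then the reversed children spliced on (here.extend).
def pvMine (ms ml : Int) (pfx : List Int) (entries : List (List Int × Nat × Int)) :
    List (List Int × Int × Int × Int) :=
  (((pvQual ms ml pfx entries).attach.map
      (fun kv => pvMine ms ml (pfx ++ [kv.1.1]) (pvProject entries kv.1.1))).reverse).foldl
    (fun h ch => h ++ ch)
    ((pvQual ms ml pfx entries).map (fun kv => (pfx ++ [kv.1], kv.2.1, kv.2.2.1, kv.2.2.2)))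
termination_by pvMEnt entries
decreasing_by
  exact pvQualDec ms ml pfx entries kv.1 kv.2

def prefixspan_iterative_alt (database : List (List Int)) (min_support : Int) (max_length : Int) (classes : List Int) : List (List Int × Int × Int × Int) :=
  pvMine min_support max_length [] ((database.zip classes).map (fun sc => (sc.1, 0, sc.2)))

-- ===== PRECONDITION & SPEC =====
-- Pre_ excludes exactly the inputs where A's `assert len(database) == len(classes)` raises.
def Pre_prefixspan_iterative (database : List (List Int)) (min_support : Int) (max_length : Int) (classes : List Int) : Prop :=
  database.length = classes.length
instance (database : List (List Int)) (min_support : Int) (max_length : Int) (classes : List Int) : Decidable (Pre_prefixspan_iterative database min_support max_length classes) := by unfold Pre_prefixspan_iterative; infer_instance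
def pvWitness_prefixspan_iterative : List (List Int) × Int × Int × List Int :=
  ([[1, 2, 1], [2, 3]], 1, 2, [0, 1])

def Spec_prefixspan_iterative (database : List (List Int)) (min_support : Int) (max_length : Int) (classes : List Int) (out : List (List Int × Int × Int × Int)) : Prop := out = prefixspan_iterative_alt database min_support max_length classes
instance (database : List (List Int)) (min_support : Int) (max_length : Int) (classes : List Int) (out : List (List Int × Int × Int × Int)) : Decidable (Spec_prefixspan_iterative database min_support max_length classes out) := by unfold Spec_prefixspan_iterative; infer_instance

-- ===== CLAIM (what is proved, stated in full; the proofs are below) =====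
def Claim_equal_prefixspan_iterative : Prop := ∀ (database : List (List Int)) (min_support : Int) (max_length : Int) (classes : List Int), Dom_prefixspan_iterative database min_support max_length classes → Pre_prefixspan_iterative database min_support max_length classes → Spec_prefixspan_iterative database min_support max_length classes (prefixspan_iterative database min_support max_length classes)

-- ===== LEMMAS AND PROOFS =====

-- abstraction: a B entry denotes its suffix and its class
def pvAbsDbE (es : List (List Int × Nat × Int)) : List (List Int) :=
  es.map (fun e => e.1.drop e.2.1)
def pvAbsClsE (es : List (List Int × Nat × Int)) : List Int :=
  es.map (fun e => e.2.2)
def pvAbsNodeE (nd : List Int × List (List Int × Nat × Int)) :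
    List Int × List (List Int) × List Int :=
  (nd.1, pvAbsDbE nd.2, pvAbsClsE nd.2)

lemma pvZipAbsE (es : List (List Int × Nat × Int)) :
    (pvAbsDbE es).zip (pvAbsClsE es) = es.map (fun e => (e.1.drop e.2.1, e.2.2)) := by
  unfold pvAbsDbE pvAbsClsE
  rw [List.zip_map']

-- the distinct items of t not yet in `used`, in first-occurrence order
def pvNew (used : PySem.Set Int) : List Int → List Int
  | [] => []
  | x :: r => if PySem.Set.contains used x then pvNew used r else x :: pvNew (PySem.Set.add used x) r

-- the effect of A's guarded step on the three dicts alone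
def pvTripleStep (cv : Int) (fnp : PySem.Dict Int Int × PySem.Dict Int Int × PySem.Dict Int Int)
    (x : Int) : PySem.Dict Int Int × PySem.Dict Int Int × PySem.Dict Int Int :=
  (PySem.Dict.modify fnp.1 x 0 (· + 1),
   if cv == 0 then PySem.Dict.modify fnp.2.1 x 0 (· + 1) else fnp.2.1,
   if cv == 1 then PySem.Dict.modify fnp.2.2 x 0 (· + 1) else fnp.2.2)

-- B's per-item dict update
def pvStepB (cv : Int) (d : PySem.Dict Int (Int × Int × Int)) (item : Int) :
    PySem.Dict Int (Int × Int × Int) :=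
  let t := PySem.Dict.getD d item (0, 0, 0)
  PySem.Dict.insert d item
    (t.1 + 1, t.2.1 + (if cv == 0 then 1 else 0), t.2.2 + (if cv == 1 then 1 else 0))

lemma pvSetAddPos {used : PySem.Set Int} {x : Int} (hu : PySem.Set.contains used x = true) :
    PySem.Set.add used x = used := by
  unfold PySem.Set.add
  rw [if_pos hu]

lemma pvSetAddNeg {used : PySem.Set Int} {x : Int} (hu : PySem.Set.contains used x = false) :
    PySem.Set.add used x = used ++ [x] := by
  unfold PySem.Set.add
  rw [if_neg (by rw [hu]; exact Bool.false_ne_true)]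

lemma pvCountStepA_fold (cv : Int) (t : List Int) :
    ∀ (f n p : PySem.Dict Int Int) (used : PySem.Set Int),
    t.foldl (pvCountStepA cv) (f, n, p, used)
      = (((pvNew used t).foldl (pvTripleStep cv) (f, n, p)).1,
         ((pvNew used t).foldl (pvTripleStep cv) (f, n, p)).2.1,
         ((pvNew used t).foldl (pvTripleStep cv) (f, n, p)).2.2,
         t.foldl PySem.Set.add used) := by
  induction t with
  | nil => intro f n p used; rfl
  | cons x r ih =>
    intro f n p used
    by_cases hu : PySem.Set.contains used x = true
    · have hadd := pvSetAddPos hu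
      simp only [List.foldl_cons, pvNew, pvCountStepA, hu, if_true, hadd]
      exact ih f n p used
    · simp only [Bool.not_eq_true] at hu
      simp only [List.foldl_cons, pvNew, pvCountStepA, hu, Bool.false_eq_true, if_false]
      exact ih _ _ _ _

lemma pvFoldAdd_eq (t : List Int) :
    ∀ (used : PySem.Set Int), t.foldl PySem.Set.add used = used ++ pvNew used t := by
  induction t with
  | nil => intro used; simp [pvNew]
  | cons x r ih =>
    intro used
    by_cases hu : PySem.Set.contains used x = true
    · have hadd := pvSetAddPos hu
      simp only [List.foldl_cons, pvNew, hu, if_true, hadd]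
      exact ih used
    · simp only [Bool.not_eq_true] at hu
      have hadd := pvSetAddNeg hu
      simp only [List.foldl_cons, pvNew, hu, Bool.false_eq_true, if_false, hadd]
      rw [ih (used ++ [x])]
      simp

lemma pvNew_eq_dedup (t : List Int) : pvNew PySem.Set.empty t = PySem.List.dedup t := by
  rw [PySem.List.dedup_eq_ofList, PySem.Set.ofList_eq_foldl, pvFoldAdd_eq]
  rfl

-- invariant tying A's three dicts to B's triple dict
def pvInv (f n p : PySem.Dict Int Int) (s : PySem.Dict Int (Int × Int × Int)) : Prop :=
  f.keys = s.keys ∧ f.keys.Nodup ∧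
    ∀ k, PySem.Dict.getD s k (0, 0, 0)
      = (PySem.Dict.getD f k 0, PySem.Dict.getD n k 0, PySem.Dict.getD p k 0)

lemma pvInvStep (cv x : Int) (f n p : PySem.Dict Int Int) (s : PySem.Dict Int (Int × Int × Int))
    (h : pvInv f n p s) :
    pvInv (pvTripleStep cv (f, n, p) x).1 (pvTripleStep cv (f, n, p) x).2.1
      (pvTripleStep cv (f, n, p) x).2.2 (pvStepB cv s x) := by
  obtain ⟨hk, hnd, hget⟩ := h
  have hc : PySem.Dict.contains f x = PySem.Dict.contains s x := by
    rw [PySem.Dict.contains_eq_decide_mem_keys, PySem.Dict.contains_eq_decide_mem_keys, hk]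
  refine ⟨?_, ?_, ?_⟩
  · show (PySem.Dict.modify f x 0 (· + 1)).keys = (pvStepB cv s x).keys
    rw [PySem.Dict.keys_modify]
    unfold pvStepB
    by_cases hcf : PySem.Dict.contains f x = true
    · rw [PySem.Dict.keys_insert_of_contains _ _ hcf,
        PySem.Dict.keys_insert_of_contains _ _ (hc ▸ hcf), hk]
    · simp only [Bool.not_eq_true] at hcf
      rw [PySem.Dict.keys_insert_of_not_contains _ _ hcf,
        PySem.Dict.keys_insert_of_not_contains _ _ (hc ▸ hcf), hk]
  · show (PySem.Dict.modify f x 0 (· + 1)).keys.Nodup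
    rw [PySem.Dict.keys_modify]
    by_cases hcf : PySem.Dict.contains f x = true
    · rw [PySem.Dict.keys_insert_of_contains _ _ hcf]
      exact hnd
    · simp only [Bool.not_eq_true] at hcf
      rw [PySem.Dict.keys_insert_of_not_contains _ _ hcf]
      rw [List.nodup_append]
      refine ⟨hnd, List.nodup_singleton x, ?_⟩
      intro a ha b hb
      rw [List.mem_singleton] at hb
      subst hb
      intro hax
      subst hax
      have := (PySem.Dict.contains_iff_mem_keys f a).mpr ha
      rw [hcf] at this
      exact Bool.false_ne_true this
  · intro k
    unfold pvStepB pvTripleStep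
    simp only []
    by_cases hkx : k = x
    · subst hkx
      rw [PySem.Dict.getD_insert, if_pos rfl, hget k,
        PySem.Dict.getD_modify, if_pos rfl,
        apply_ite (fun d : PySem.Dict Int Int => PySem.Dict.getD d k 0),
        PySem.Dict.getD_modify, if_pos rfl,
        apply_ite (fun d : PySem.Dict Int Int => PySem.Dict.getD d k 0),
        PySem.Dict.getD_modify, if_pos rfl]
      simp only [Prod.mk.injEq]
      refine ⟨trivial, ?_, ?_⟩ <;> split_ifs <;> omega
    · rw [PySem.Dict.getD_insert, if_neg hkx, hget k,
        PySem.Dict.getD_modify, if_neg hkx,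
        apply_ite (fun d : PySem.Dict Int Int => PySem.Dict.getD d k 0),
        PySem.Dict.getD_modify, if_neg hkx,
        apply_ite (fun d : PySem.Dict Int Int => PySem.Dict.getD d k 0),
        PySem.Dict.getD_modify, if_neg hkx]
      simp

lemma pvInvFold (cv : Int) (u : List Int) :
    ∀ (f n p : PySem.Dict Int Int) (s : PySem.Dict Int (Int × Int × Int)), pvInv f n p s →
    pvInv ((u.foldl (pvTripleStep cv) (f, n, p))).1 ((u.foldl (pvTripleStep cv) (f, n, p))).2.1
      ((u.foldl (pvTripleStep cv) (f, n, p))).2.2 (u.foldl (pvStepB cv) s) := by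
  induction u with
  | nil => intro f n p s h; exact h
  | cons x r ih =>
    intro f n p s h
    simp only [List.foldl_cons]
    have := pvInvStep cv x f n p s h
    have heq : pvTripleStep cv (f, n, p) x
        = ((pvTripleStep cv (f, n, p) x).1, (pvTripleStep cv (f, n, p) x).2.1,
           (pvTripleStep cv (f, n, p) x).2.2) := rfl
    rw [heq]
    exact ih _ _ _ _ this

lemma pvCountAB (es : List (List Int × Nat × Int)) :
    pvInv (pvCountA (pvAbsDbE es) (pvAbsClsE es)).1 (pvCountA (pvAbsDbE es) (pvAbsClsE es)).2.1
      (pvCountA (pvAbsDbE es) (pvAbsClsE es)).2.2 (pvCountB es) := by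
  unfold pvCountA pvCountB
  rw [pvZipAbsE, List.foldl_map]
  have main : ∀ (es : List (List Int × Nat × Int))
      (d : PySem.Dict Int Int × PySem.Dict Int Int × PySem.Dict Int Int)
      (s : PySem.Dict Int (Int × Int × Int)), pvInv d.1 d.2.1 d.2.2 s →
      pvInv ((es.foldl (fun d e =>
          let r := (e.1.drop e.2.1).foldl (pvCountStepA e.2.2) (d.1, d.2.1, d.2.2, PySem.Set.empty)
          (r.1, r.2.1, r.2.2.1)) d)).1
        ((es.foldl (fun d e =>
          let r := (e.1.drop e.2.1).foldl (pvCountStepA e.2.2) (d.1, d.2.1, d.2.2, PySem.Set.empty)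
          (r.1, r.2.1, r.2.2.1)) d)).2.1
        ((es.foldl (fun d e =>
          let r := (e.1.drop e.2.1).foldl (pvCountStepA e.2.2) (d.1, d.2.1, d.2.2, PySem.Set.empty)
          (r.1, r.2.1, r.2.2.1)) d)).2.2
        (es.foldl (fun d e =>
          (PySem.List.dedup (e.1.drop e.2.1)).foldl
            (fun d item =>
              let t := PySem.Dict.getD d item (0, 0, 0)
              PySem.Dict.insert d item
                (t.1 + 1, t.2.1 + (if e.2.2 == 0 then 1 else 0), t.2.2 + (if e.2.2 == 1 then 1 else 0)))
            d) s) := by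
    intro es
    induction es with
    | nil => intro d s h; exact h
    | cons e r ih =>
      intro d s h
      simp only [List.foldl_cons]
      rw [pvCountStepA_fold, pvNew_eq_dedup]
      have hB : (fun (d : PySem.Dict Int (Int × Int × Int)) (item : Int) =>
          let t := PySem.Dict.getD d item (0, 0, 0)
          PySem.Dict.insert d item
            (t.1 + 1, t.2.1 + (if e.2.2 == 0 then 1 else 0), t.2.2 + (if e.2.2 == 1 then 1 else 0)))
          = pvStepB e.2.2 := rfl
      rw [hB]
      exact ih _ _ (pvInvFold e.2.2 (PySem.List.dedup (e.1.drop e.2.1)) d.1 d.2.1 d.2.2 s h)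
  exact main es (PySem.Dict.empty, PySem.Dict.empty, PySem.Dict.empty) PySem.Dict.empty
    ⟨rfl, by simpa using PySem.Dict.nodup_keys_empty, fun k => rfl⟩

lemma pvProjAB (es : List (List Int × Nat × Int)) (item : Int) :
    pvProjectA (pvAbsDbE es) (pvAbsClsE es) item
      = (pvAbsDbE (pvProject es item), pvAbsClsE (pvProject es item)) := by
  unfold pvProjectA
  rw [pvZipAbsE, List.foldl_map]
  have main : ∀ (es : List (List Int × Nat × Int)) (acc : List (List Int) × List Int),
      (es.foldl (fun acc e =>
        match PySem.List.index? (e.1.drop e.2.1) item with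
        | some idx => (acc.1 ++ [PySem.List.slice (e.1.drop e.2.1) (some ((idx : Int) + 1)) none], acc.2 ++ [e.2.2])
        | none => acc) acc)
      = (acc.1 ++ pvAbsDbE (pvProject es item), acc.2 ++ pvAbsClsE (pvProject es item)) := by
    intro es
    induction es with
    | nil => intro acc; simp [pvProject, pvAbsDbE, pvAbsClsE]
    | cons e r ih =>
      intro acc
      simp only [List.foldl_cons]
      rw [pvProject]
      cases h : PySem.List.index? (e.1.drop e.2.1) item with
      | none =>
        have hB : pvIndexFrom e.1 e.2.1 item = none := by
          unfold pvIndexFrom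
          rw [h]
          rfl
        simp only [h, hB]
        exact ih acc
      | some idx =>
        have hB : pvIndexFrom e.1 e.2.1 item = some (e.2.1 + idx) := by
          unfold pvIndexFrom
          rw [h]
          rfl
        simp only [h, hB]
        have hslice : PySem.List.slice (e.1.drop e.2.1) (some ((idx : Int) + 1)) none
            = e.1.drop (e.2.1 + idx + 1) := by
          have hcast : ((idx : Int) + 1) = ((idx + 1 : Nat) : Int) := by push_cast; ring
          rw [hcast, PySem.List.slice_from_natCast, List.drop_drop, Nat.add_assoc]
        rw [hslice]
        rw [ih (acc.1 ++ [e.1.drop (e.2.1 + idx + 1)], acc.2 ++ [e.2.2])]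
        simp [pvAbsDbE, pvAbsClsE]
  have h0 := main es ([], [])
  simp only [List.nil_append] at h0
  exact h0

-- items of A's freq dict, filtered, correspond to B's qual list
lemma pvQualAB (ms ml : Int) (pfx : List Int) (es : List (List Int × Nat × Int)) :
    ((PySem.Dict.items (pvCountA (pvAbsDbE es) (pvAbsClsE es)).1).filter
        (fun kv => !decide (kv.2 < ms) && !decide ((pfx.length : Int) + 1 > ml)))
      = (pvQual ms ml pfx es).map
          (fun kv => (kv.1, (PySem.Dict.getD (pvCountB es) kv.1 (0, 0, 0)).1)) ∧
    ∀ kv ∈ pvQual ms ml pfx es, kv.2 = PySem.Dict.getD (pvCountB es) kv.1 (0, 0, 0) ∧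
      (PySem.Dict.getD (pvCountA (pvAbsDbE es) (pvAbsClsE es)).2.1 kv.1 0,
       PySem.Dict.getD (pvCountA (pvAbsDbE es) (pvAbsClsE es)).2.2 kv.1 0) = (kv.2.2.1, kv.2.2.2) := by
  obtain ⟨hkeys, hnd, hget⟩ := pvCountAB es
  have hndB : (pvCountB es).keys.Nodup := by rw [← hkeys]; exact hnd
  have hitemsB : PySem.Dict.items (pvCountB es)
      = (pvCountB es).keys.map (fun k => (k, PySem.Dict.getD (pvCountB es) k ((0:Int), (0:Int), (0:Int)))) :=
    PySem.Dict.items_eq_map_keys _ hndB _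
  constructor
  · rw [PySem.Dict.items_eq_map_keys (pvCountA (pvAbsDbE es) (pvAbsClsE es)).1 hnd 0, hkeys]
    unfold pvQual
    split_ifs with hml
    · rw [List.filter_map]
      have : ((fun (kv : Int × Int) => !decide (kv.2 < ms) && !decide ((pfx.length : Int) + 1 > ml))
          ∘ (fun k => (k, PySem.Dict.getD (pvCountA (pvAbsDbE es) (pvAbsClsE es)).1 k 0))) = fun _ => false := by
        funext k
        simp [hml]
      rw [this]
      simp
    · rw [hitemsB, List.filter_map, List.filter_map, List.map_map]
      have hpred : ((fun (kv : Int × Int) => !decide (kv.2 < ms) && !decide ((pfx.length : Int) + 1 > ml))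
            ∘ (fun k => (k, PySem.Dict.getD (pvCountA (pvAbsDbE es) (pvAbsClsE es)).1 k 0)))
          = ((fun (kv : Int × Int × Int × Int) => decide (kv.2.1 ≥ ms))
            ∘ (fun k => (k, PySem.Dict.getD (pvCountB es) k ((0:Int), (0:Int), (0:Int))))) := by
        funext k
        simp only [Function.comp_apply]
        rw [hget k]
        simp only []
        rw [← decide_not, ← decide_not, ← Bool.decide_and]
        exact decide_eq_decide.mpr (by constructor <;> intro h <;> [omega; exact ⟨by omega, by omega⟩])
      rw [hpred]
      apply List.map_congr_left
      intro k hk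
      simp only [Function.comp_apply]
      rw [hget k]
  · intro kv hkv
    unfold pvQual at hkv
    split_ifs at hkv with hml
    · exact absurd hkv (List.not_mem_nil)
    · have hitems : kv ∈ PySem.Dict.items (pvCountB es) := List.mem_of_mem_filter hkv
      rw [hitemsB] at hitems
      rcases List.mem_map.mp hitems with ⟨k, hk, hkeq⟩
      have h1 : kv.1 = k := by rw [← hkeq]
      have h2 : kv.2 = PySem.Dict.getD (pvCountB es) k (0, 0, 0) := by rw [← hkeq]
      subst h1
      refine ⟨h2, ?_⟩
      have := hget kv.1
      rw [← h2] at this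
      rw [Prod.ext_iff] at this
      have h3 := this.2
      rw [Prod.ext_iff] at h3
      exact Prod.ext h3.1.symm h3.2.symm

-- the A-side items pass over an abstracted node, phrased through B's qual.
lemma pvItemsAB (ms ml : Int) (pfx : List Int) (es : List (List Int × Nat × Int))
    (pats : List (List Int × Int × Int × Int))
    (restA : List (List Int × List (List Int) × List Int)) :
    pvItemsA ms ml pfx (pvAbsDbE es) (pvAbsClsE es) (pats, restA)
      = (pats ++ (pvQual ms ml pfx es).map
            (fun kv => (pfx ++ [kv.1], kv.2.1, kv.2.2.1, kv.2.2.2)),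
         (((pvQual ms ml pfx es).map
            (fun kv => pvAbsNodeE (pfx ++ [kv.1], pvProject es kv.1))).reverse) ++ restA) := by
  obtain ⟨hfilter, hvals⟩ := pvQualAB ms ml pfx es
  rw [pvItemsA_shape, hfilter, List.map_map, List.map_map]
  refine Prod.ext ?_ ?_
  · refine congrArg (pats ++ ·) ?_
    apply List.map_congr_left
    intro kv hkv
    obtain ⟨h2, h3⟩ := hvals kv hkv
    simp only [Function.comp_apply]
    rw [← h2]
    have hn := congrArg Prod.fst h3
    have hp := congrArg Prod.snd h3
    simp only [] at hn hp
    rw [hn, hp]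
  · refine congrArg (· ++ restA) ?_
    refine congrArg List.reverse ?_
    apply List.map_congr_left
    intro kv hkv
    simp only [Function.comp_apply]
    rw [pvProjAB]
    rfl

-- B's splice loop: foldl (· ++ ·) = init ++ flatten
lemma pvFoldAppend (L : List (List (List Int × Int × Int × Int)))
    (init : List (List Int × Int × Int × Int)) :
    L.foldl (fun h ch => h ++ ch) init = init ++ L.flatten := by
  induction L generalizing init with
  | nil => simp
  | cons x r ih => simp [ih, List.append_assoc]

-- pvMine, restated without attach
lemma pvMine_eq (ms ml : Int) (pfx : List Int) (es : List (List Int × Nat × Int)) :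
    pvMine ms ml pfx es
      = (pvQual ms ml pfx es).map (fun kv => (pfx ++ [kv.1], kv.2.1, kv.2.2.1, kv.2.2.2))
        ++ (((pvQual ms ml pfx es).map
              (fun kv => pvMine ms ml (pfx ++ [kv.1]) (pvProject es kv.1))).reverse).flatten := by
  rw [pvMine, pvFoldAppend]
  have hattach := List.attach_map_val (l := pvQual ms ml pfx es)
    (f := fun kv => pvMine ms ml (pfx ++ [kv.1]) (pvProject es kv.1))
  rw [hattach]

-- the main correspondence: A's stack loop, applied to abstracted B nodes, appends the mined trees
lemma pvLoopMine (ms ml : Int) : ∀ (N : Nat) (stackB : List (List Int × List (List Int × Nat × Int)))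
    (pats : List (List Int × Int × Int × Int)), pvMeas (stackB.map pvAbsNodeE) ≤ N →
    pvLoopA ms ml (stackB.map pvAbsNodeE) pats
      = pats ++ (stackB.map (fun nd => pvMine ms ml nd.1 nd.2)).flatten := by
  intro N
  induction N using Nat.strong_induction_on with
  | _ N ih =>
    intro stackB pats hle
    cases stackB with
    | nil => simp [pvLoopA]
    | cons nd rest =>
      simp only [List.map_cons] at hle ⊢
      rw [pvLoopA]
      have habs : pvAbsNodeE nd = (nd.1, pvAbsDbE nd.2, pvAbsClsE nd.2) := rfl
      rw [habs]
      have hitems := pvItemsAB ms ml nd.1 nd.2 pats (rest.map pvAbsNodeE)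
      have hmeasLt : pvMeas (pvItemsA ms ml nd.1 (pvAbsDbE nd.2) (pvAbsClsE nd.2)
          (pats, rest.map pvAbsNodeE)).2 < N := by
        have h1 := pvMeasItemsA ms ml nd.1 (pvAbsDbE nd.2) (pvAbsClsE nd.2) pats (rest.map pvAbsNodeE)
        have h2 : pvMeas ((nd.1, pvAbsDbE nd.2, pvAbsClsE nd.2) :: rest.map pvAbsNodeE)
            = pvWt (pvAbsDbE nd.2) + pvMeas (rest.map pvAbsNodeE) := by simp [pvMeas]
        rw [habs, h2] at hle
        omega
      set childNodes := (pvQual ms ml nd.1 nd.2).map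
        (fun kv => (nd.1 ++ [kv.1], pvProject nd.2 kv.1)) with hchild
      have hsnd : (pvItemsA ms ml nd.1 (pvAbsDbE nd.2) (pvAbsClsE nd.2)
          (pats, rest.map pvAbsNodeE)).2 = (childNodes.reverse ++ rest).map pvAbsNodeE := by
        rw [hitems]
        simp only [List.map_append, List.map_reverse, hchild, List.map_map]
        rfl
      have hfst : (pvItemsA ms ml nd.1 (pvAbsDbE nd.2) (pvAbsClsE nd.2)
          (pats, rest.map pvAbsNodeE)).1
          = pats ++ (pvQual ms ml nd.1 nd.2).map
              (fun kv => (nd.1 ++ [kv.1], kv.2.1, kv.2.2.1, kv.2.2.2)) := by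
        rw [hitems]
      rw [hfst, hsnd]
      have hle2 : pvMeas ((childNodes.reverse ++ rest).map pvAbsNodeE) ≤ pvMeas (pvItemsA ms ml
          nd.1 (pvAbsDbE nd.2) (pvAbsClsE nd.2) (pats, rest.map pvAbsNodeE)).2 := by
        rw [hsnd]
      have hrec := ih _ hmeasLt (childNodes.reverse ++ rest)
        (pats ++ (pvQual ms ml nd.1 nd.2).map
          (fun kv => (nd.1 ++ [kv.1], kv.2.1, kv.2.2.1, kv.2.2.2)))
        hle2
      rw [hrec]
      rw [pvMine_eq]
      simp only [List.map_append, List.flatten_append, List.flatten_cons, List.map_cons,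
        List.map_reverse, hchild, List.map_map, List.append_assoc]
      rfl

theorem pvMainEq (database : List (List Int)) (min_support max_length : Int) (classes : List Int)
    (hpre : database.length = classes.length) :
    prefixspan_iterative database min_support max_length classes
      = prefixspan_iterative_alt database min_support max_length classes := by
  unfold prefixspan_iterative prefixspan_iterative_alt
  have h1 : pvAbsDbE ((database.zip classes).map (fun sc => (sc.1, 0, sc.2))) = database := by
    unfold pvAbsDbE
    rw [List.map_map]
    have : ((fun (e : List Int × Nat × Int) => e.1.drop e.2.1)
        ∘ (fun (sc : List Int × Int) => (sc.1, (0 : Nat), sc.2))) = Prod.fst := by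
      funext sc
      simp
    rw [this]
    exact List.map_fst_zip (le_of_eq hpre)
  have h2 : pvAbsClsE ((database.zip classes).map (fun sc => (sc.1, 0, sc.2))) = classes := by
    unfold pvAbsClsE
    rw [List.map_map]
    have : ((fun (e : List Int × Nat × Int) => e.2.2)
        ∘ (fun (sc : List Int × Int) => (sc.1, (0 : Nat), sc.2))) = Prod.snd := by
      funext sc
      simp
    rw [this]
    exact List.map_snd_zip (le_of_eq (hpre.symm))
  have hstack : [(([] : List Int), database, classes)]
      = ([(([] : List Int), (database.zip classes).map (fun sc => (sc.1, 0, sc.2)))].map pvAbsNodeE) := by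
    simp [pvAbsNodeE, h1, h2]
  rw [hstack, pvLoopMine min_support max_length
    (pvMeas ([(([] : List Int), (database.zip classes).map (fun sc => (sc.1, 0, sc.2)))].map pvAbsNodeE))
    _ _ le_rfl]
  simp

-- ===== VERDICT (by name: the statement is the Claim_ definition above) =====
theorem prefixspan_iterative_spec : Claim_equal_prefixspan_iterative := by
  intro database min_support max_length classes _ hpre
  exact pvMainEq database min_support max_length classes hpre
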